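-- pv_equiv track=rewrite | github.com/RichardGabelman/AdventOfCode2024 | Day2/Problem2/main.py | mostIncreasing
-- ===== SOURCE A (Python) =====
-- def allIncreasing(arr):
--     for i, n in enumerate(arr):
--       if i == 0:
--           continue
--       if n <= arr[i - 1]:
--           return False
--     return True
--
-- def mostIncreasing(arr):
--     if allIncreasing(arr):
--         return [idx for idx in range(len(arr))]
--     potentialRemoved = []
--     for i in range(len(arr)):
--         copy = arr.copy()
--         del copy[i]
--         if allIncreasing(copy):
--           potentialRemoved.append(i)
--     return potentialRemoved
-- ===== SOURCE B (Python) =====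
-- def mostIncreasing(arr):
--     n = len(arr)
--     # pref[k]: arr[:k+1] strictly increasing; built in one forward pass
--     pref = []
--     ok = True
--     for k in range(n):
--         if k > 0:
--             ok = ok and arr[k - 1] < arr[k]
--         pref.append(ok)
--     # suff[k]: arr[k:] strictly increasing; built backwards then reversed
--     suff = []
--     ok = True
--     for k in range(n - 1, -1, -1):
--         if k < n - 1:
--             ok = ok and arr[k] < arr[k + 1]
--         suff.append(ok)
--     suff.reverse()
--     if n == 0 or pref[n - 1]:
--         return list(range(n))
--     res = []
--     for i in range(n):
--         if ((i == 0 or pref[i - 1])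
--                 and (i == n - 1 or suff[i + 1])
--                 and (i == 0 or i == n - 1 or arr[i - 1] < arr[i + 1])):
--             res.append(i)
--     return res
-- ===== Notes on version B (the rewrite author's own statement) =====
-- stated objective: faster
-- what changed: Replaces the quadratic 'delete each index and rescan the whole copy' loop by one pass computing prefix/suffix strictly-increasing flags, deciding each removal in O(1) via the two flags and one bridge comparison.
import Mathlib
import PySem

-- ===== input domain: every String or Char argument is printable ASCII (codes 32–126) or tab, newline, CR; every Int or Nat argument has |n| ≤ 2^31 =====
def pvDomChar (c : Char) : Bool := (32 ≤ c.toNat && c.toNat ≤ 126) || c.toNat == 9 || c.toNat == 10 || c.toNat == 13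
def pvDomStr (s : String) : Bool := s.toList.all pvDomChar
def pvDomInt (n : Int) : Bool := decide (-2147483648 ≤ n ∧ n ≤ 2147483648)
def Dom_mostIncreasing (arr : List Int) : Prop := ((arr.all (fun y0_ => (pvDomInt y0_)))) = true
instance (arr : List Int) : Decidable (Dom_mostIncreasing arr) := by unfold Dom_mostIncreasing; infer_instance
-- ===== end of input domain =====

-- B replaces A's quadratic delete-and-rescan check by a single pass computing prefix/suffix
-- strictly-increasing flags, deciding each removal in O(1) (objective: faster).


-- ===== PORT A =====
-- 'for i, n in enumerate(arr): …' with early 'return False'; arr[i-1] is accessed only for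
-- enumerate indices i ≥ 1, which are in range, so the total pyGetD is exact here.
def allIncLoop (arr : List Int) : List (Int × Int) → Bool
  | [] => true
  | (i, n) :: rest =>
    if i = 0 then allIncLoop arr rest
    else if n ≤ PySem.List.pyGetD arr (i - 1) 0 then false else allIncLoop arr rest

def allIncreasingA (arr : List Int) : Bool := allIncLoop arr (PySem.List.enumerate arr)

def mostIncreasing (arr : List Int) : List Int :=
  if allIncreasingA arr then PySem.List.pyRange 0 arr.length 1
  else
    -- 'del copy[i]' with 0 ≤ i < len(arr) is exactly List.eraseIdx
    (PySem.List.pyRange 0 arr.length 1).foldl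
      (fun acc i => if allIncreasingA (arr.eraseIdx i.toNat) then acc ++ [i] else acc) []

-- ===== PORT B =====
-- loop body of B's forward prefix pass ('ok = ok and arr[k-1] < arr[k]; pref.append(ok)');
-- all indices touched are in range, so the total pyGetD is exact here
def prefStep (arr : List Int) (st : List Bool × Bool) (k : Int) : List Bool × Bool :=
  let ok := if 0 < k then st.2 && decide (PySem.List.pyGetD arr (k-1) 0 < PySem.List.pyGetD arr k 0) else st.2
  (st.1 ++ [ok], ok)

-- loop body of B's backward suffix pass
def suffStep (arr : List Int) (n : Int) (st : List Bool × Bool) (k : Int) : List Bool × Bool :=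
  let ok := if k < n - 1 then st.2 && decide (PySem.List.pyGetD arr k 0 < PySem.List.pyGetD arr (k+1) 0) else st.2
  (st.1 ++ [ok], ok)

-- loop body of B's final selection pass
def pickStep (arr : List Int) (n : Int) (pref suff : List Bool) (acc : List Int) (i : Int) : List Int :=
  if (decide (i = 0) || PySem.List.pyGetD pref (i-1) true)
      && (decide (i = n-1) || PySem.List.pyGetD suff (i+1) true)
      && (decide (i = 0) || decide (i = n-1) || decide (PySem.List.pyGetD arr (i-1) 0 < PySem.List.pyGetD arr (i+1) 0))
  then acc ++ [i] else acc

def mostIncreasing_alt (arr : List Int) : List Int :=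
  let n : Int := arr.length
  let pref := ((PySem.List.pyRange 0 n 1).foldl (prefStep arr) ([], true)).1
  let suff := (((PySem.List.pyRange (n-1) (-1) (-1)).foldl (suffStep arr n) ([], true)).1).reverse
  if decide (n = 0) || PySem.List.pyGetD pref (n-1) true then PySem.List.pyRange 0 n 1
  else (PySem.List.pyRange 0 n 1).foldl (pickStep arr n pref suff) []

-- ===== PRECONDITION & SPEC =====
def Spec_mostIncreasing (arr : List Int) (out : List Int) : Prop := out = mostIncreasing_alt arr
instance (arr : List Int) (out : List Int) : Decidable (Spec_mostIncreasing arr out) := by unfold Spec_mostIncreasing; infer_instance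

-- ===== CLAIM (what is proved, stated in full; the proofs are below) =====
def Claim_equal_mostIncreasing : Prop := ∀ (arr : List Int), Dom_mostIncreasing arr → Spec_mostIncreasing arr (mostIncreasing arr)

-- ===== LEMMAS AND PROOFS =====

-- pref[k] of B: arr[:k+1] strictly increasing
def gP (arr : List Int) (k : Nat) : Bool := decide (List.IsChain (· < ·) (arr.take (k+1)))
-- suff[k] of B: arr[k:] strictly increasing
def gS (arr : List Int) (k : Nat) : Bool := decide (List.IsChain (· < ·) (arr.drop k))

theorem isChain_take_one (l : List Int) : List.IsChain (· < ·) (l.take 1) := by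
  cases l <;> simp

theorem getLast?_take (l : List Int) (m : Nat) (h1 : 0 < m) (h : m - 1 < l.length) :
    (l.take m).getLast? = some (l[m-1]) := by
  conv_lhs => rw [show m = m - 1 + 1 by omega]
  rw [List.take_succ_eq_append_getElem h, List.getLast?_concat]

-- A's scan from index j (j ≥ 1) decides strict increasingness of arr[j-1:]
theorem allIncLoop_drop (arr : List Int) (k : Nat) :
    ∀ (j : Nat), arr.length - j = k → 1 ≤ j → j ≤ arr.length →
    allIncLoop arr (PySem.List.enumerate (arr.drop j) (j : Int)) =
      decide (List.IsChain (· < ·) (arr.drop (j - 1))) := by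
  induction k with
  | zero =>
    intro j hk h1 h2
    have hj : j = arr.length := by omega
    subst hj
    rw [List.drop_length, PySem.List.enumerate_nil]
    rcases Nat.eq_zero_or_pos arr.length with h | h
    · have harr : arr = [] := List.eq_nil_of_length_eq_zero h
      subst harr; simp [allIncLoop]
    · have hlt : arr.length - 1 < arr.length := by omega
      rw [List.drop_eq_getElem_cons hlt, show arr.length - 1 + 1 = arr.length by omega,
        List.drop_length]
      simp [allIncLoop]
  | succ k ih =>
    intro j hk h1 h2
    have hj : j < arr.length := by omega
    rw [List.drop_eq_getElem_cons hj, PySem.List.enumerate_cons]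
    simp only [allIncLoop]
    rw [if_neg (by omega : ¬ ((j : Int) = 0))]
    rw [show ((j : Int) - 1) = ((j - 1 : Nat) : Int) by omega, PySem.List.pyGetD_natCast,
      List.getD_eq_getElem arr 0 (show j - 1 < arr.length by omega)]
    have e1 : arr.drop (j-1) = arr[j-1] :: arr.drop j := by
      rw [List.drop_eq_getElem_cons (show j - 1 < arr.length by omega)]
      congr 2
      omega
    by_cases hle : arr[j] ≤ arr[j-1]
    · rw [if_pos hle]
      have hnlt : ¬ (arr[j-1] < arr[j]) := by omega
      symm
      rw [decide_eq_false_iff_not]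
      intro hch
      rw [e1, List.drop_eq_getElem_cons hj, List.isChain_cons_cons] at hch
      exact hnlt hch.1
    · rw [if_neg hle]
      have hlt : arr[j-1] < arr[j] := by omega
      rw [show ((j : Int) + 1) = ((j + 1 : Nat) : Int) by omega,
        ih (j+1) (by omega) (by omega) (by omega)]
      rw [show j + 1 - 1 = j from rfl, e1]
      rw [Bool.eq_iff_iff]
      simp only [decide_eq_true_eq]
      rw [List.drop_eq_getElem_cons hj, List.isChain_cons_cons]
      constructor
      · intro h'; exact ⟨hlt, h'⟩
      · rintro ⟨_, h'⟩; exact h'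

theorem allIncreasingA_eq (arr : List Int) :
    allIncreasingA arr = decide (List.IsChain (· < ·) arr) := by
  cases arr with
  | nil => simp [allIncreasingA, PySem.List.enumerate_nil, allIncLoop]
  | cons x t =>
    unfold allIncreasingA
    rw [PySem.List.enumerate_cons]
    simp only [allIncLoop]
    have h := allIncLoop_drop (x :: t) ((x :: t).length - 1) 1 rfl le_rfl (by simp)
    simp only [List.drop_succ_cons, List.drop_zero, Nat.cast_one, Nat.sub_self] at h ⊢
    convert h using 2

-- deleting index i: the rest is increasing iff prefix, suffix and the bridge are
theorem isChain_erase (arr : List Int) (i : Nat) (hi : i < arr.length) :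
    decide (List.IsChain (· < ·) (arr.eraseIdx i)) =
      (decide (List.IsChain (· < ·) (arr.take i)) &&
       decide (List.IsChain (· < ·) (arr.drop (i + 1))) &&
       (decide (i = 0) || decide (i + 1 = arr.length) ||
        decide (arr.getD (i - 1) 0 < arr.getD (i + 1) 0))) := by
  rw [List.eraseIdx_eq_take_drop_succ, Bool.eq_iff_iff]
  simp only [Bool.and_eq_true, Bool.or_eq_true, decide_eq_true_eq]
  rw [List.isChain_append]
  have hCD : (∀ x ∈ (arr.take i).getLast?, ∀ y ∈ (arr.drop (i+1)).head?, x < y) ↔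
      (i = 0 ∨ i + 1 = arr.length ∨ arr.getD (i-1) 0 < arr.getD (i+1) 0) := by
    by_cases h0 : i = 0
    · subst h0; simp
    · by_cases hn : i + 1 = arr.length
      · rw [List.head?_drop, List.getElem?_eq_none (by omega)]
        simp [hn]
      · rw [List.head?_drop, List.getElem?_eq_getElem (show i + 1 < arr.length by omega),
          getLast?_take arr i (by omega) (by omega),
          List.getD_eq_getElem arr 0 (show i - 1 < arr.length by omega),
          List.getD_eq_getElem arr 0 (show i + 1 < arr.length by omega)]
        simp [h0, hn]
  rw [hCD]
  tauto

-- one step of B's forward pass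
theorem pref_ok (arr : List Int) (m : Nat) (hm : m < arr.length) :
    (if (0:Int) < (m:Int) then
        decide (List.IsChain (· < ·) (arr.take m)) &&
          decide (PySem.List.pyGetD arr ((m:Int)-1) 0 < PySem.List.pyGetD arr (m:Int) 0)
      else decide (List.IsChain (· < ·) (arr.take m))) = gP arr m := by
  by_cases h0 : 0 < m
  · rw [if_pos (by omega), show ((m:Int) - 1) = ((m - 1 : Nat) : Int) by omega,
      PySem.List.pyGetD_natCast, PySem.List.pyGetD_natCast,
      List.getD_eq_getElem arr 0 (show m - 1 < arr.length by omega),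
      List.getD_eq_getElem arr 0 hm]
    unfold gP
    rw [Bool.eq_iff_iff]
    simp only [Bool.and_eq_true, decide_eq_true_eq]
    rw [List.take_succ_eq_append_getElem hm, List.isChain_append,
      getLast?_take arr m h0 (by omega)]
    simp
  · have hm0 : m = 0 := by omega
    subst hm0
    rw [if_neg (by omega)]
    unfold gP
    have h1 := isChain_take_one arr
    simp [h1]

-- one step of B's backward pass
theorem suff_ok (arr : List Int) (k : Nat) (h : k < arr.length) :
    (if (k:Int) < (arr.length:Int) - 1 then
        gS arr (k+1) && decide (PySem.List.pyGetD arr (k:Int) 0 < PySem.List.pyGetD arr ((k:Int)+1) 0)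
      else gS arr (k+1)) = gS arr k := by
  by_cases h2 : k + 1 < arr.length
  · rw [if_pos (by omega), show ((k:Int) + 1) = ((k + 1 : Nat) : Int) by omega,
      PySem.List.pyGetD_natCast, PySem.List.pyGetD_natCast,
      List.getD_eq_getElem arr 0 h, List.getD_eq_getElem arr 0 h2]
    unfold gS
    rw [Bool.eq_iff_iff]
    simp only [Bool.and_eq_true, decide_eq_true_eq]
    rw [List.drop_eq_getElem_cons h, List.drop_eq_getElem_cons h2, List.isChain_cons_cons]
    tauto
  · rw [if_neg (by omega)]
    have hk1 : k + 1 = arr.length := by omega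
    unfold gS
    rw [List.drop_eq_getElem_cons h, hk1, List.drop_length]
    simp

-- B's forward pass builds the list of prefix flags
theorem prefLoop (arr : List Int) (m : Nat) (hm : m ≤ arr.length) :
    (PySem.List.pyRange 0 (m:Int) 1).foldl (prefStep arr) ([], true) =
      ((List.range m).map (gP arr), decide (List.IsChain (· < ·) (arr.take m))) := by
  induction m with
  | zero => rw [PySem.List.pyRange_one_eq_nil (by omega)]; simp
  | succ m ih =>
    rw [show ((m+1 : Nat) : Int) = (m:Int) + 1 by omega,
      PySem.List.pyRange_one_succ_right (by omega), List.foldl_append, ih (by omega)]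
    simp only [List.foldl_cons, List.foldl_nil]
    unfold prefStep
    simp only []
    rw [pref_ok arr m (by omega), List.range_succ, List.map_append]
    simp [gP]

-- one application of suffStep on the invariant state
theorem suffStep_eq (arr : List Int) (k : Nat) (h : k < arr.length) (acc : List Bool) :
    suffStep arr (arr.length:Int) (acc, gS arr (k+1)) ((k:Nat):Int) = (acc ++ [gS arr k], gS arr k) := by
  unfold suffStep
  simp only []
  rw [suff_ok arr k h]

-- B's backward pass builds the reversed list of suffix flags
theorem suffLoop (arr : List Int) :
    ∀ (j : Nat), j < arr.length → ∀ (acc : List Bool),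
    (PySem.List.pyRange (j:Int) (-1) (-1)).foldl (suffStep arr arr.length) (acc, gS arr (j+1)) =
      (acc ++ ((List.range (j+1)).map (gS arr)).reverse, gS arr 0) := by
  intro j
  induction j with
  | zero =>
    intro h0 acc
    rw [PySem.List.pyRange_neg_one_cons (by omega : (-1:Int) < ((0:Nat):Int)),
      PySem.List.pyRange_neg_one_eq_nil (by omega : ((0:Nat):Int) - 1 ≤ -1)]
    simp only [List.foldl_cons, List.foldl_nil]
    rw [suffStep_eq arr 0 h0 acc]
    simp
  | succ j ih =>
    intro hj acc
    rw [PySem.List.pyRange_neg_one_cons (by omega : (-1:Int) < ((j+1:Nat):Int)),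
      show ((j+1:Nat):Int) - 1 = ((j:Nat):Int) by omega]
    simp only [List.foldl_cons]
    rw [suffStep_eq arr (j+1) hj acc, ih (by omega) (acc ++ [gS arr (j+1)])]
    rw [List.range_succ (n := j+1), List.map_append, List.reverse_append]
    simp

-- ===== VERDICT (by name: the statement is the Claim_ definition above) =====
theorem mostIncreasing_spec : Claim_equal_mostIncreasing := by
  intro arr _
  unfold Spec_mostIncreasing mostIncreasing mostIncreasing_alt
  simp only []
  have hpref : ((PySem.List.pyRange 0 (arr.length:Int) 1).foldl (prefStep arr) ([], true)).1 =
      (List.range arr.length).map (gP arr) := by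
    rw [prefLoop arr arr.length le_rfl]
  rcases Nat.eq_zero_or_pos arr.length with hn | hn
  · have harr : arr = [] := List.eq_nil_of_length_eq_zero hn
    subst harr
    decide
  · have hgSn : gS arr arr.length = true := by
      unfold gS; rw [List.drop_length]; simp
    have hsuffp := suffLoop arr (arr.length - 1) (by omega) []
    rw [show arr.length - 1 + 1 = arr.length by omega, hgSn,
      show ((arr.length - 1 : Nat) : Int) = (arr.length:Int) - 1 by omega] at hsuffp
    have hsuff : (((PySem.List.pyRange ((arr.length:Int)-1) (-1) (-1)).foldl
        (suffStep arr arr.length) ([], true)).1).reverse =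
        (List.range arr.length).map (gS arr) := by
      rw [hsuffp]; simp
    rw [hpref, hsuff, allIncreasingA_eq]
    have hcondB : (decide ((arr.length:Int) = 0) ||
        PySem.List.pyGetD ((List.range arr.length).map (gP arr)) ((arr.length:Int)-1) true) =
        decide (List.IsChain (· < ·) arr) := by
      rw [decide_eq_false (by omega : ¬ ((arr.length:Int) = 0)), Bool.false_or,
        show ((arr.length:Int) - 1) = ((arr.length - 1 : Nat) : Int) by omega,
        PySem.List.pyGetD_natCast,
        PySem.List.getD_map_range (gP arr) arr.length (arr.length - 1) true (by omega)]
      unfold gP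
      rw [show arr.length - 1 + 1 = arr.length by omega, List.take_length]
    rw [hcondB]
    split_ifs with hch
    · rfl
    · apply PySem.List.foldl_congr_mem
      intro acc i hi
      rw [PySem.List.mem_pyRange_one] at hi
      have hik : i = ((i.toNat : Nat) : Int) := by omega
      generalize hk : i.toNat = k at *
      have hklt : k < arr.length := by omega
      subst hik
      rw [allIncreasingA_eq, isChain_erase arr k hklt]
      unfold pickStep
      have hA1 : (decide (((k:Nat):Int) = 0) ||
          PySem.List.pyGetD ((List.range arr.length).map (gP arr)) (((k:Nat):Int)-1) true) =
          decide (List.IsChain (· < ·) (arr.take k)) := by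
        by_cases k0 : k = 0
        · subst k0; simp
        · rw [decide_eq_false (by omega : ¬ (((k:Nat):Int) = 0)), Bool.false_or,
            show (((k:Nat):Int) - 1) = ((k - 1 : Nat) : Int) by omega,
            PySem.List.pyGetD_natCast,
            PySem.List.getD_map_range (gP arr) arr.length (k-1) true (by omega)]
          unfold gP
          rw [show k - 1 + 1 = k by omega]
      have hA2 : (decide (((k:Nat):Int) = (arr.length:Int) - 1) ||
          PySem.List.pyGetD ((List.range arr.length).map (gS arr)) (((k:Nat):Int)+1) true) =
          decide (List.IsChain (· < ·) (arr.drop (k+1))) := by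
        by_cases keq : k + 1 = arr.length
        · rw [decide_eq_true (by omega : ((k:Nat):Int) = (arr.length:Int) - 1), Bool.true_or,
            show k + 1 = arr.length from keq, List.drop_length]
          simp
        · rw [decide_eq_false (by omega : ¬ (((k:Nat):Int) = (arr.length:Int) - 1)), Bool.false_or,
            show (((k:Nat):Int) + 1) = ((k + 1 : Nat) : Int) by omega,
            PySem.List.pyGetD_natCast,
            PySem.List.getD_map_range (gS arr) arr.length (k+1) true (by omega)]
          rfl
      have hA3 : (decide (((k:Nat):Int) = 0) || decide (((k:Nat):Int) = (arr.length:Int) - 1) ||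
          decide (PySem.List.pyGetD arr (((k:Nat):Int)-1) 0 < PySem.List.pyGetD arr (((k:Nat):Int)+1) 0)) =
          (decide (k = 0) || decide (k + 1 = arr.length) ||
            decide (arr.getD (k-1) 0 < arr.getD (k+1) 0)) := by
        by_cases k0 : k = 0
        · subst k0; simp
        · by_cases keq : k + 1 = arr.length
          · rw [decide_eq_true (by omega : ((k:Nat):Int) = (arr.length:Int) - 1),
              decide_eq_true keq]
            simp
          · rw [decide_eq_false (by omega : ¬ (((k:Nat):Int) = 0)),
              decide_eq_false (by omega : ¬ (((k:Nat):Int) = (arr.length:Int) - 1)),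
              decide_eq_false k0, decide_eq_false keq,
              show (((k:Nat):Int) - 1) = ((k - 1 : Nat) : Int) by omega,
              show (((k:Nat):Int) + 1) = ((k + 1 : Nat) : Int) by omega,
              PySem.List.pyGetD_natCast, PySem.List.pyGetD_natCast]
      rw [hA1, hA2, hA3]
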